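-- pv_equiv track=rewrite | github.com/carla-simulator/carla | Co-Simulation/Sumo/sumo-1.7.0/tools/sumolib/scenario/scenarios/__init__.py | minIndexValue_unset
-- ===== SOURCE A (Python) =====
-- def minIndexValue_unset(l, l2):
--     i = 0
--     min_val = None
--     min_idx = -1
--     while i < len(l):
--         if l2[i] != 0:
--             i = i + 1
--             continue
--         if min_val is None or min_val > l[i]:
--             min_idx = i
--             min_val = l[i]
--         i = i + 1
--     return min_idx, min_val
-- ===== SOURCE B (Python) =====
-- def minIndexValue_unset(l, l2):
--     def solve(lo, hi):
--         # best (index, value) among positions lo..hi-1 where l2 is zero, else (-1, None)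
--         if lo >= hi:
--             return -1, None
--         if hi - lo == 1:
--             if l2[lo] == 0:
--                 return lo, l[lo]
--             return -1, None
--         mid = (lo + hi) // 2
--         li, lv = solve(lo, mid)
--         ri, rv = solve(mid, hi)
--         if lv is None:
--             return ri, rv
--         if rv is None or lv <= rv:
--             return li, lv
--         return ri, rv
--     return solve(0, len(l))
-- ===== Notes on version B (the rewrite author's own statement) =====
-- stated objective: alternative
-- what changed: Replaces A's single linear scan with a running minimum by a divide-and-conquer recursion: solve each half of the index range independently and combine the two partial answers (left wins ties, preserving A's first-occurrence tie-break).
import Mathlib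
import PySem

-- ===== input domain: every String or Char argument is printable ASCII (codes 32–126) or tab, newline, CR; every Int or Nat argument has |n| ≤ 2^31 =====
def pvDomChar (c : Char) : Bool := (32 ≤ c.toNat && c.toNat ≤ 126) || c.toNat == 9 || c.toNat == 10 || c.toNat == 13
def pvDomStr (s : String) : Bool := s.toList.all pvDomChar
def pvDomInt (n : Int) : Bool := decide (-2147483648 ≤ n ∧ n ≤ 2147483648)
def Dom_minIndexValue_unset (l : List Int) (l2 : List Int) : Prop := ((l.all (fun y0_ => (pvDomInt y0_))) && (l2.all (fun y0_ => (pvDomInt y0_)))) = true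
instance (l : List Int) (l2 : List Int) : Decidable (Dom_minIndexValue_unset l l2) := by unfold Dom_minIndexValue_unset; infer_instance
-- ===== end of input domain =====

-- B replaces A's single linear scan with a running minimum by a divide-and-conquer
-- recursion on the index range, combining the two half-answers (objective: alternative).

-- ===== PORT A =====
-- literal port of A's while loop: index i, running (min_idx, min_val) state
def pvLoopA (l : List Int) (l2 : List Int) (i : Nat) (mi : Int) (mv : Option Int) :
    Int × Option Int :=
  if _h : i < l.length then
    if ((PySem.List.pyGet? l2 (i : Int)).getD 0) ≠ 0 then
      pvLoopA l l2 (i + 1) mi mv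
    else
      match mv with
      | none => pvLoopA l l2 (i + 1) (i : Int) (some ((PySem.List.pyGet? l (i : Int)).getD 0))
      | some v =>
        if v > (PySem.List.pyGet? l (i : Int)).getD 0 then
          pvLoopA l l2 (i + 1) (i : Int) (some ((PySem.List.pyGet? l (i : Int)).getD 0))
        else
          pvLoopA l l2 (i + 1) mi mv
  else (mi, mv)
termination_by l.length - i

def minIndexValue_unset (l : List Int) (l2 : List Int) : Int × Option Int :=
  pvLoopA l l2 0 (-1) none

-- ===== PORT B =====
-- Source B's solve(lo, hi): divide and conquer over the index range [lo, hi).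
-- lo and hi are always nonnegative in Source B (they start from 0 and len(l)), so they are
-- carried as Nat here and Python's (lo + hi) // 2 is exactly Nat division (lo + hi) / 2.
def pvSolve (l : List Int) (l2 : List Int) (lo hi : Nat) : Int × Option Int :=
  if _h0 : hi ≤ lo then (-1, none)
  else if _h1 : hi - lo = 1 then
    if ((PySem.List.pyGet? l2 (lo : Int)).getD 0) = 0 then
      ((lo : Int), some ((PySem.List.pyGet? l (lo : Int)).getD 0))
    else (-1, none)
  else
    let mid := (lo + hi) / 2
    let L := pvSolve l l2 lo mid
    let R := pvSolve l l2 mid hi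
    match L.2 with
    | none => R
    | some lv =>
      match R.2 with
      | none => L
      | some rv => if lv ≤ rv then L else R
termination_by hi - lo
decreasing_by all_goals omega

def minIndexValue_unset_alt (l : List Int) (l2 : List Int) : Int × Option Int :=
  pvSolve l l2 0 l.length

-- ===== PRECONDITION & SPEC =====
-- A indexes l2[i] for every i < len(l), so it raises IndexError iff len(l2) < len(l).
def Pre_minIndexValue_unset (l : List Int) (l2 : List Int) : Prop := l.length ≤ l2.length
instance (l : List Int) (l2 : List Int) : Decidable (Pre_minIndexValue_unset l l2) := by
  unfold Pre_minIndexValue_unset; infer_instance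

def pvWitness_minIndexValue_unset : List Int × List Int := ([3, 1, 2], [0, 0, 1])

def Spec_minIndexValue_unset (l : List Int) (l2 : List Int) (out : Int × Option Int) : Prop :=
  out = minIndexValue_unset_alt l l2
instance (l : List Int) (l2 : List Int) (out : Int × Option Int) :
    Decidable (Spec_minIndexValue_unset l l2 out) := by
  unfold Spec_minIndexValue_unset; infer_instance

-- ===== CLAIM (what is proved, stated in full; the proofs are below) =====
def Claim_equal_minIndexValue_unset : Prop :=
  ∀ (l : List Int) (l2 : List Int), Dom_minIndexValue_unset l l2 →
    Pre_minIndexValue_unset l l2 →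
    Spec_minIndexValue_unset l l2 (minIndexValue_unset l l2)

-- ===== LEMMAS AND PROOFS =====

-- strict lexicographic comparison of (value, index) pairs
def pvLexLt (a b : Int × Int) : Bool := a.1 < b.1 || (a.1 == b.1 && a.2 < b.2)

theorem pvLexLt_iff (a b : Int × Int) :
    pvLexLt a b = true ↔ (a.1 < b.1 ∨ (a.1 = b.1 ∧ a.2 < b.2)) := by
  simp [pvLexLt]

-- "keep the smaller, first wins ties" selection
def pvMinF (m y : Int × Int) : Int × Int := if pvLexLt y m then y else m

theorem pvMinF_assoc (m y w : Int × Int) :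
    pvMinF (pvMinF m y) w = pvMinF m (pvMinF y w) := by
  obtain ⟨m1, m2⟩ := m; obtain ⟨y1, y2⟩ := y; obtain ⟨w1, w2⟩ := w
  simp only [pvMinF]
  split_ifs <;>
    simp only [pvLexLt_iff] at * <;>
    first
      | rfl
      | (simp only [Prod.mk.injEq]; omega)

-- minimum of a candidate list (none ↔ empty), as in a first-wins running fold
def pvMinLex? : List (Int × Int) → Option (Int × Int)
  | [] => none
  | x :: xs => some (xs.foldl pvMinF x)

theorem pvFoldMin_eq (ys : List (Int × Int)) (m : Int × Int) :
    ys.foldl pvMinF m =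
      match pvMinLex? ys with
      | none => m
      | some w => pvMinF m w := by
  induction ys generalizing m with
  | nil => rfl
  | cons y ys ih =>
    simp only [List.foldl_cons, pvMinLex?]
    rw [ih (pvMinF m y), ih y]
    cases hys : pvMinLex? ys with
    | none => rfl
    | some w => exact pvMinF_assoc m y w

theorem pvMinLex?_append (a b : List (Int × Int)) :
    pvMinLex? (a ++ b) =
      match pvMinLex? a, pvMinLex? b with
      | none, r => r
      | some ma, none => some ma
      | some ma, some mb => some (pvMinF ma mb) := by
  cases a with
  | nil => cases b <;> rfl
  | cons x xs =>
    simp only [List.cons_append, pvMinLex?, List.foldl_append]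
    rw [pvFoldMin_eq b (xs.foldl pvMinF x)]
    cases b <;> rfl

theorem pvFoldMin_mem (xs : List (Int × Int)) (x : Int × Int) :
    xs.foldl pvMinF x ∈ x :: xs := by
  induction xs generalizing x with
  | nil => simp
  | cons y ys ih =>
    simp only [List.foldl_cons]
    have hxy : pvMinF x y = x ∨ pvMinF x y = y := by
      simp only [pvMinF]; split_ifs <;> simp
    cases hxy with
    | inl h'' =>
      rw [h'']
      rcases List.mem_cons.mp (ih x) with h' | h' <;> simp [h']
    | inr h'' =>
      rw [h'']
      rcases List.mem_cons.mp (ih y) with h' | h' <;> simp [h']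

theorem pvMinLex?_mem {cs : List (Int × Int)} {m : Int × Int}
    (h : pvMinLex? cs = some m) : m ∈ cs := by
  cases cs with
  | nil => simp [pvMinLex?] at h
  | cons x xs =>
    simp only [pvMinLex?, Option.some.injEq] at h
    rw [← h]; exact pvFoldMin_mem xs x

-- (index, value-option) answer computed from a candidate list
def pvBest (cs : List (Int × Int)) : Int × Option Int :=
  match pvMinLex? cs with
  | none => (-1, none)
  | some (v, j) => (j, some v)

-- A's state-update rule, as a fold step over candidate pairs (value, index)
def pvStepA (s : Int × Option Int) (c : Int × Int) : Int × Option Int :=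
  match s.2 with
  | none => (c.2, some c.1)
  | some v => if v > c.1 then (c.2, some c.1) else s

-- candidate pairs (value, index) for mask-zero positions in [lo, hi)
def pvCandsRange (l : List Int) (l2 : List Int) (lo hi : Nat) : List (Int × Int) :=
  (List.range' lo (hi - lo)).filterMap (fun (j : Nat) =>
    if ((PySem.List.pyGet? l2 (j : Int)).getD 0) == 0 then
      some ((PySem.List.pyGet? l (j : Int)).getD 0, (j : Int))
    else none)

theorem pvCandsRange_empty (l l2 : List Int) (lo hi : Nat) (h : hi ≤ lo) :
    pvCandsRange l l2 lo hi = [] := by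
  have h0 : hi - lo = 0 := by omega
  simp [pvCandsRange, h0]

theorem pvCandsRange_succ (l l2 : List Int) (lo hi : Nat) (h : lo < hi) :
    pvCandsRange l l2 lo hi =
      (if ((PySem.List.pyGet? l2 (lo : Int)).getD 0) == 0 then
        [((PySem.List.pyGet? l (lo : Int)).getD 0, (lo : Int))] else []) ++
      pvCandsRange l l2 (lo + 1) hi := by
  have hr : hi - lo = (hi - (lo + 1)) + 1 := by omega
  unfold pvCandsRange
  rw [hr, List.range'_succ, List.filterMap_cons]
  split_ifs with hc
  · simp
  · simp

theorem pvCandsRange_split (l l2 : List Int) (lo mid hi : Nat)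
    (h1 : lo ≤ mid) (h2 : mid ≤ hi) :
    pvCandsRange l l2 lo hi = pvCandsRange l l2 lo mid ++ pvCandsRange l l2 mid hi := by
  unfold pvCandsRange
  rw [← List.filterMap_append]
  congr 1
  have hap := @List.range'_append lo (mid - lo) (hi - mid) 1
  rw [show lo + 1 * (mid - lo) = mid by omega,
      show (mid - lo) + (hi - mid) = hi - lo by omega] at hap
  exact hap.symm

theorem pvCandsRange_idx_bounds (l l2 : List Int) (lo hi : Nat) :
    ∀ c ∈ pvCandsRange l l2 lo hi, (lo : Int) ≤ c.2 ∧ c.2 < (hi : Int) := by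
  intro c hc
  unfold pvCandsRange at hc
  rcases List.mem_filterMap.mp hc with ⟨j, hj, hjeq⟩
  have hjr := List.mem_range'_1.mp hj
  have hjlo : lo ≤ j := hjr.1
  have hjhi : j < hi := by omega
  split_ifs at hjeq
  cases hjeq
  constructor
  · show (lo : Int) ≤ (j : Int)
    exact_mod_cast hjlo
  · show (j : Int) < (hi : Int)
    exact_mod_cast hjhi

-- indices in the candidate list are strictly increasing
theorem pvCandsRange_pairwise (l l2 : List Int) (lo hi : Nat) :
    (pvCandsRange l l2 lo hi).Pairwise (fun a b => a.2 < b.2) := by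
  by_cases h : lo < hi
  · rw [pvCandsRange_succ l l2 lo hi h]
    have htail := pvCandsRange_pairwise l l2 (lo + 1) hi
    have hge := pvCandsRange_idx_bounds l l2 (lo + 1) hi
    split_ifs with hc
    · refine List.pairwise_cons.mpr ⟨?_, htail⟩
      intro b hb
      have := (hge b hb).1
      have : ((lo : Int) + 1) ≤ b.2 := by exact_mod_cast this
      omega
    · simpa using htail
  · rw [pvCandsRange_empty l l2 lo hi (by omega)]
    simp
termination_by hi - lo
decreasing_by omega

-- A's loop, from index i on, is a fold of pvStepA over the remaining candidates
theorem pvLoopA_eq_foldl (l l2 : List Int) (i : Nat) (mi : Int) (mv : Option Int) :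
    pvLoopA l l2 i mi mv = (pvCandsRange l l2 i l.length).foldl pvStepA (mi, mv) := by
  by_cases h : i < l.length
  · rw [pvLoopA.eq_def]
    simp only [h, dif_pos]
    rw [pvCandsRange_succ l l2 i l.length h]
    by_cases hz : ((PySem.List.pyGet? l2 (i : Int)).getD 0) = 0
    · simp only [hz, ne_eq, not_true_eq_false, if_false, beq_self_eq_true, if_pos]
      cases mv with
      | none =>
        rw [pvLoopA_eq_foldl l l2 (i + 1)]
        simp [pvStepA]
      | some v =>
        by_cases hv : v > (PySem.List.pyGet? l (i : Int)).getD 0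
        · have hv' : (l[i]?.getD 0 : Int) < v := by simpa using hv
          simp only [hv, if_pos]
          rw [pvLoopA_eq_foldl l l2 (i + 1)]
          simp [pvStepA, hv']
        · have hv' : ¬ ((l[i]?.getD 0 : Int) < v) := by simpa using hv
          simp only [hv, if_false]
          rw [pvLoopA_eq_foldl l l2 (i + 1)]
          simp [pvStepA, hv']
    · simp only [hz, ne_eq, not_false_eq_true, if_true, beq_iff_eq]
      rw [pvLoopA_eq_foldl l l2 (i + 1)]
      simp
  · rw [pvLoopA.eq_def]
    simp only [h, dif_neg, not_false_iff]
    rw [pvCandsRange_empty l l2 i l.length (by omega)]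
    rfl
termination_by l.length - i

-- the bridge: folding A's step from a 'some' state whose index is below all candidate
-- indices equals the first-wins lexicographic min fold (state transposed)
theorem pvFold_bridge (cs : List (Int × Int)) (v j : Int)
    (hlt : ∀ c ∈ cs, j < c.2) (hpw : cs.Pairwise (fun a b => a.2 < b.2)) :
    cs.foldl pvStepA (j, some v) =
      (let m := cs.foldl pvMinF (v, j)
       (m.2, some m.1)) := by
  induction cs generalizing v j with
  | nil => simp
  | cons c cs ih =>
    have hjc : j < c.2 := hlt c (by simp)
    have hlt' : ∀ x ∈ cs, j < x.2 := fun x hx => hlt x (by simp [hx])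
    have hhead : ∀ x ∈ cs, c.2 < x.2 := (List.pairwise_cons.mp hpw).1
    have htail : cs.Pairwise (fun a b => a.2 < b.2) := (List.pairwise_cons.mp hpw).2
    simp only [List.foldl_cons]
    by_cases hv : v > c.1
    · have hlex : pvLexLt c (v, j) = true := by
        simp only [pvLexLt]
        have : c.1 < v := hv
        simp [this]
      rw [show pvStepA (j, some v) c = (c.2, some c.1) by simp [pvStepA, hv]]
      rw [ih c.1 c.2 hhead htail]
      simp [pvMinF, hlex]
    · have hlex : pvLexLt c (v, j) = false := by
        simp only [pvLexLt]
        have h1 : ¬ (c.1 < v) := by omega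
        by_cases he : c.1 = v
        · have h2 : ¬ (c.2 < j) := by omega
          simp [he, h2]
        · simp [h1, he]
      rw [show pvStepA (j, some v) c = (j, some v) by simp [pvStepA, hv]]
      rw [ih v j hlt' htail]
      simp [pvMinF, hlex]

-- B's divide-and-conquer equals the candidate-list minimum on its range
theorem pvSolve_eq_best (l l2 : List Int) (lo hi : Nat) :
    pvSolve l l2 lo hi = pvBest (pvCandsRange l l2 lo hi) := by
  rw [pvSolve.eq_def]
  by_cases h0 : hi ≤ lo
  · simp only [h0, dif_pos]
    rw [pvCandsRange_empty l l2 lo hi h0]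
    rfl
  · simp only [h0, dif_neg, not_false_iff]
    by_cases h1 : hi - lo = 1
    · simp only [h1, dif_pos]
      rw [pvCandsRange_succ l l2 lo hi (by omega),
          pvCandsRange_empty l l2 (lo + 1) hi (by omega)]
      by_cases hc : ((PySem.List.pyGet? l2 (lo : Int)).getD 0) = 0
      all_goals
        have hc' := hc
        simp only [PySem.List.pyGet?_natCast] at hc'
        simp [hc', pvBest, pvMinLex?]
    · simp only [h1, dif_neg, not_false_iff]
      have hmid1 : lo ≤ (lo + hi) / 2 := by omega
      have hmid2 : (lo + hi) / 2 ≤ hi := by omega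
      rw [pvSolve_eq_best l l2 lo ((lo + hi) / 2), pvSolve_eq_best l l2 ((lo + hi) / 2) hi,
          pvCandsRange_split l l2 lo ((lo + hi) / 2) hi hmid1 hmid2]
      set ca := pvCandsRange l l2 lo ((lo + hi) / 2) with hca
      set cb := pvCandsRange l l2 ((lo + hi) / 2) hi with hcb
      unfold pvBest
      rw [pvMinLex?_append ca cb]
      cases ha : pvMinLex? ca with
      | none => cases hb : pvMinLex? cb <;> rfl
      | some ma =>
        cases hb : pvMinLex? cb with
        | none => rfl
        | some mb =>
          obtain ⟨lv, li⟩ := ma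
          obtain ⟨rv, ri⟩ := mb
          have hbla : li < (((lo + hi) / 2 : Nat) : Int) :=
            (pvCandsRange_idx_bounds l l2 lo ((lo + hi) / 2) _ (pvMinLex?_mem ha)).2
          have hblb : (((lo + hi) / 2 : Nat) : Int) ≤ ri :=
            (pvCandsRange_idx_bounds l l2 ((lo + hi) / 2) hi _ (pvMinLex?_mem hb)).1
          have hir : li < ri := by omega
          simp only [pvMinF, pvLexLt]
          by_cases hle : lv ≤ rv
      -- lv ≤ rv: the combined min is the left pair (index tie-break cannot fire)
          · have hlt : ¬ (rv < lv) := by omega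
            have : (decide (rv < lv) || (rv == lv && decide (ri < li))) = false := by
              by_cases he : rv = lv
              · simp [he]
                omega
              · simp [he, hlt]
            simp [hle, this]
          · have hlt : rv < lv := by omega
            have : (decide (rv < lv) || (rv == lv && decide (ri < li))) = true := by
              simp [hlt]
            simp [hle, this]
termination_by hi - lo
decreasing_by all_goals omega

-- ===== VERDICT (by name: the statement is the Claim_ definition above) =====
theorem minIndexValue_unset_spec : Claim_equal_minIndexValue_unset := by
  intro l l2 _hdom _hpre
  unfold Spec_minIndexValue_unset
  unfold minIndexValue_unset minIndexValue_unset_alt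
  rw [pvLoopA_eq_foldl, pvSolve_eq_best]
  cases hc : pvCandsRange l l2 0 l.length with
  | nil => simp [pvBest, pvMinLex?]
  | cons c cs =>
    have hpair := pvCandsRange_pairwise l l2 0 l.length
    rw [hc] at hpair
    have hlt : ∀ x ∈ cs, c.2 < x.2 := (List.pairwise_cons.mp hpair).1
    have htail : cs.Pairwise (fun a b => a.2 < b.2) := (List.pairwise_cons.mp hpair).2
    simp only [List.foldl_cons, pvBest, pvMinLex?]
    rw [show pvStepA (-1, none) c = (c.2, some c.1) by simp [pvStepA]]
    rw [pvFold_bridge cs c.1 c.2 hlt htail]
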